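-- pv_equiv track=rewrite | github.com/mdiazv/codejam | 2009/1c/a-all-your-base/base.py | solve
-- ===== SOURCE A (Python) =====
-- def solve(S):
--     values = [1, 0] + list(range(2, 64))
--     tr, k = {}, 0
--     for c in S:
--         if c not in tr:
--             tr[c] = values[k]
--             k += 1
--     t, p = 0, 0
--     base = max(2, len(tr))
--     for c in reversed(S):
--         t += tr[c] * (base ** p)
--         p += 1
--     return t
-- ===== SOURCE B (Python) =====
-- def solve(S):
--     # distinct characters in first-seen order; digit values 1, 0, 2, 3, ...
--     order = dict.fromkeys(S)
--     tr = {c: (1 if i == 0 else 0 if i == 1 else i) for i, c in enumerate(order)}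
--     base = max(2, len(tr))
--     t = 0
--     for c in S:  # Horner: one multiply-add per character
--         t = t * base + tr[c]
--     return t
-- ===== Notes on version B (the rewrite author's own statement) =====
-- stated objective: faster
-- what changed: B replaces A's backward pass that recomputes base**p for every position (O(n^2) bigint work) with a single forward Horner pass t = t*base + digit, and builds the digit table by a dict comprehension over dict.fromkeys(S) with a closed-form digit value instead of A's conditional loop over a 64-entry values list.
import Mathlib
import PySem

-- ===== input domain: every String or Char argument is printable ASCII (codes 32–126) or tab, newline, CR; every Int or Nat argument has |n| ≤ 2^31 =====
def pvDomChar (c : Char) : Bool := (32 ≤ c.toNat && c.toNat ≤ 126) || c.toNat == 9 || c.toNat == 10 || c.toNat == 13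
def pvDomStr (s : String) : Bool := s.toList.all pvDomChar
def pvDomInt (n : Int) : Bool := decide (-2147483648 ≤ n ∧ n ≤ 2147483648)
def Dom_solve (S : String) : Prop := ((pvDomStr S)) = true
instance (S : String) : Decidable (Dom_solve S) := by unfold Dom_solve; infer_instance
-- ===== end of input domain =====

-- B replaces A's backward pass that recomputes base ** p at every position by a single forward
-- Horner pass (t = t * base + digit) and builds the digit table from dict.fromkeys with a
-- closed-form digit value instead of A's conditional loop over a values list (objective: faster).

-- ===== PORT A =====
def solve (S : String) : Int :=
  let values : List Int := [1, 0] ++ PySem.List.pyRange 2 64 1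
  let trk : PySem.Dict Char Int × Nat :=
    S.toList.foldl
      (fun st c =>
        if st.1.contains c = false then
          (st.1.insert c (PySem.List.pyGetD values (st.2 : Int) 0), st.2 + 1)
        else st)
      (PySem.Dict.empty, 0)
  let base : Int := max 2 (trk.1.size : Int)
  let tp : Int × Nat :=
    S.toList.reverse.foldl
      (fun tp c => (tp.1 + trk.1.getD c 0 * base ^ tp.2, tp.2 + 1)) (0, 0)
  tp.1

-- ===== PORT B =====
def solve_alt (S : String) : Int :=
  let order := PySem.List.dedup S.toList
  let tr := PySem.Dict.ofList ((PySem.List.enumerate order).map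
      (fun ic => (ic.2, if ic.1 == 0 then (1 : Int) else if ic.1 == 1 then 0 else ic.1)))
  let base : Int := max 2 (tr.size : Int)
  S.toList.foldl (fun t c => t * base + tr.getD c 0) 0

-- ===== PRECONDITION & SPEC =====
-- Pre_ excludes exactly the strings with more than 64 distinct characters, on which
-- Python A raises IndexError (values[k] with k >= 64).
def Pre_solve (S : String) : Prop := (PySem.List.dedup S.toList).length ≤ 64
instance (S : String) : Decidable (Pre_solve S) := by unfold Pre_solve; infer_instance
def pvWitness_solve : String := "11001001000"
def Spec_solve (S : String) (out : Int) : Prop := out = solve_alt S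
instance (S : String) (out : Int) : Decidable (Spec_solve S out) := by unfold Spec_solve; infer_instance

-- ===== CLAIM (what is proved, stated in full; the proofs are below) =====
def Claim_equal_solve : Prop := ∀ (S : String), Dom_solve S → Pre_solve S → Spec_solve S (solve S)

-- ===== LEMMAS AND PROOFS =====

-- A's digit value for the k-th fresh character: values[k] (pyGetD's default is never reached inside Pre_)
def pvValI (i : Int) : Int := PySem.List.pyGetD ([1, 0] ++ PySem.List.pyRange 2 64 1) i 0
-- B's closed-form digit value
def pvF (i : Int) : Int := if i == 0 then 1 else if i == 1 then 0 else i
-- the translation table as an association list: distinct chars in first-seen order, value v(index)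
def pvPairs (v : Int → Int) (cs : List Char) : List (Char × Int) :=
  (PySem.List.enumerate (PySem.List.dedup cs)).map (fun ic => (ic.2, v ic.1))

lemma pv_valI_eq_f : ∀ k : Nat, k < 64 → pvValI (k : Int) = pvF (k : Int) := by decide

lemma pv_pairs_eq (cs : List Char) (h : (PySem.List.dedup cs).length ≤ 64) :
    pvPairs pvValI cs = pvPairs pvF cs := by
  unfold pvPairs
  apply List.map_congr_left
  intro ic hic
  rw [PySem.List.mem_enumerate_iff] at hic
  obtain ⟨k, hk, rfl⟩ := hic
  simp only [zero_add]
  rw [pv_valI_eq_f k (by omega)]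

lemma pv_keys (v : Int → Int) (cs : List Char) :
    (PySem.Dict.ofList (pvPairs v cs)).keys = PySem.List.dedup cs := by
  have h1 : PySem.Dict.ofList (pvPairs v cs)
      = (pvPairs v cs).foldl (fun d p => d.insert p.1 p.2) PySem.Dict.empty := rfl
  rw [h1, PySem.Dict.keys_foldl_insert_key (pvPairs v cs) Prod.fst (fun _ p => p.2) PySem.Dict.empty]
  have h2 : (pvPairs v cs).map Prod.fst = PySem.List.dedup cs := by
    unfold pvPairs
    rw [List.map_map]
    exact PySem.List.map_snd_enumerate _ _
  rw [h2]
  have h3 : PySem.Set.update (PySem.Dict.empty : PySem.Dict Char Int).keys (PySem.List.dedup cs)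
      = PySem.Set.ofList (PySem.List.dedup cs) := rfl
  rw [h3]
  exact PySem.Set.ofList_eq_self_of_nodup _ (PySem.List.nodup_dedup cs)

lemma pv_dedup_append (cs : List Char) (c : Char) :
    PySem.List.dedup (cs ++ [c])
      = if c ∈ PySem.List.dedup cs then PySem.List.dedup cs else PySem.List.dedup cs ++ [c] := by
  have h : PySem.List.dedup (cs ++ [c]) = PySem.Set.add (PySem.List.dedup cs) c := by
    simp [PySem.List.dedup, PySem.Set.ofList, List.foldl_append]
  rw [h]
  show (if PySem.Set.contains (PySem.List.dedup cs) c then _ else _) = _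
  by_cases hm : c ∈ PySem.List.dedup cs
  · rw [if_pos ((PySem.Set.contains_iff _ c).mpr hm), if_pos hm]
  · rw [if_neg (by simpa using (fun hh => hm ((PySem.Set.contains_iff _ c).mp hh))), if_neg hm]

lemma pv_ofList_append {κ ν : Type} [BEq κ] (ps : List (κ × ν)) (p : κ × ν) :
    PySem.Dict.ofList (ps ++ [p]) = (PySem.Dict.ofList ps).insert p.1 p.2 := by
  simp [PySem.Dict.ofList, PySem.Dict.update, List.foldl_append]

lemma pv_pairs_append (v : Int → Int) (cs : List Char) (c : Char) (h : ¬ c ∈ PySem.List.dedup cs) :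
    pvPairs v (cs ++ [c])
      = pvPairs v cs ++ [(c, v ((PySem.List.dedup cs).length : Int))] := by
  unfold pvPairs
  rw [pv_dedup_append, if_neg h]
  simp [PySem.List.enumerate_append, PySem.List.enumerate_cons, PySem.List.enumerate_nil]

-- A's first loop builds exactly the dict {i-th fresh char ↦ values[i]} and k = number of distinct chars
lemma pv_trA : ∀ cs : List Char,
    List.foldl (fun (st : PySem.Dict Char Int × Nat) c =>
        if st.1.contains c = false then
          (st.1.insert c (PySem.List.pyGetD ([1, 0] ++ PySem.List.pyRange 2 64 1) (st.2 : Int) 0), st.2 + 1)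
        else st)
      (PySem.Dict.empty, 0) cs
    = (PySem.Dict.ofList (pvPairs pvValI cs), (PySem.List.dedup cs).length) := by
  intro cs
  induction cs using List.reverseRecOn with
  | nil => rfl
  | append_singleton cs c ih =>
    rw [List.foldl_append, ih]
    simp only [List.foldl_cons, List.foldl_nil]
    by_cases hm : c ∈ PySem.List.dedup cs
    · have hc : (PySem.Dict.ofList (pvPairs pvValI cs)).contains c = true := by
        rw [PySem.Dict.contains_iff_mem_keys, pv_keys]; exact hm
      rw [hc]
      simp only [Bool.true_eq_false, if_false]
      unfold pvPairs
      rw [pv_dedup_append, if_pos hm]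
    · have hc : (PySem.Dict.ofList (pvPairs pvValI cs)).contains c = false := by
        rw [← Bool.not_eq_true, PySem.Dict.contains_iff_mem_keys, pv_keys]; exact hm
      rw [hc]
      simp only [if_true]
      rw [pv_pairs_append pvValI cs c hm, pv_ofList_append, pv_dedup_append, if_neg hm]
      simp [pvValI]

lemma pv_horner_shift (b : Int) (g : Char → Int) :
    ∀ (cs : List Char) (a : Int),
      cs.foldl (fun t c => t * b + g c) a = a * b ^ cs.length + cs.foldl (fun t c => t * b + g c) 0 := by
  intro cs
  induction cs with
  | nil => intro a; simp
  | cons c cs ih =>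
    intro a
    simp only [List.foldl_cons, List.length_cons]
    rw [ih (a * b + g c), ih (0 * b + g c)]
    ring

-- A's second loop (over reversed S, with explicit powers) computes the Horner fold
lemma pv_rev_loop (b : Int) (g : Char → Int) :
    ∀ (cs : List Char) (t : Int) (p : Nat),
      cs.reverse.foldl (fun tp c => (tp.1 + g c * b ^ tp.2, tp.2 + 1)) (t, p)
        = (t + b ^ p * cs.foldl (fun t c => t * b + g c) 0, p + cs.length) := by
  intro cs t p
  rw [List.foldl_reverse]
  induction cs with
  | nil => simp
  | cons c cs ih =>
    simp only [List.foldr_cons, ih, List.foldl_cons, List.length_cons]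
    rw [pv_horner_shift b g cs (0 * b + g c)]
    refine Prod.ext ?_ ?_ <;> simp [pow_add] <;> ring

-- ===== VERDICT (by name: the statement is the Claim_ definition above) =====
theorem solve_spec : Claim_equal_solve := by
  intro S _ hpre
  unfold Spec_solve
  simp only [solve, solve_alt]
  rw [pv_trA S.toList]
  have hp : PySem.Dict.ofList (pvPairs pvValI S.toList)
      = PySem.Dict.ofList ((PySem.List.enumerate (PySem.List.dedup S.toList)).map
          (fun ic => (ic.2, if ic.1 == 0 then (1 : Int) else if ic.1 == 1 then 0 else ic.1))) := by
    rw [pv_pairs_eq S.toList hpre]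
    simp only [pvPairs, pvF]
  rw [hp]
  rw [pv_rev_loop]
  simp
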